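-- pv_equiv track=rewrite | github.com/1024sparrow/traliva | src/build_scripts/utils/sugar/names.py | generate_varname
-- ===== SOURCE A (Python) =====
-- generate_varname__ar1 = 'qwertyuiopasdfghjklzxcvbnmQWERTYUIOPASDFGHJKLZXCVBNM'
--
-- generate_varname__ar2 = 'qwertyuiopasdfghjklzxcvbnmQWERTYUIOPASDFGHJKLZXCVBNM1234567890'
--
-- generate_varname__n1 = len(generate_varname__ar1)
--
-- generate_varname__n2 = len(generate_varname__ar2)
--
-- def generate_varname(p_n):
--     retval = ''
--     n = p_n
--     while n >= generate_varname__n1: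
--         retval = generate_varname__ar2[n % generate_varname__n2] + retval
--         n = n // generate_varname__n2
--     retval = generate_varname__ar1[n] + retval
--     return retval
-- ===== SOURCE B (Python) =====
-- generate_varname__ar1 = 'qwertyuiopasdfghjklzxcvbnmQWERTYUIOPASDFGHJKLZXCVBNM'
-- generate_varname__ar2 = 'qwertyuiopasdfghjklzxcvbnmQWERTYUIOPASDFGHJKLZXCVBNM1234567890'
-- generate_varname__n1 = len(generate_varname__ar1)
-- generate_varname__n2 = len(generate_varname__ar2)
--
-- def generate_varname(p_n):
--     if p_n < generate_varname__n1:
--         return generate_varname__ar1[p_n]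
--     return generate_varname(p_n // generate_varname__n2) + generate_varname__ar2[p_n % generate_varname__n2]
-- ===== Notes on version B (the rewrite author's own statement) =====
-- stated objective: alternative
-- what changed: Replaced the accumulator while-loop with string prepends by a direct recursion on the magnitude of p_n that emits digits most-significant-first via the call stack, keeping the mixed-radix rule (final digit from ar1, intermediate digits from ar2).
import Mathlib
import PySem

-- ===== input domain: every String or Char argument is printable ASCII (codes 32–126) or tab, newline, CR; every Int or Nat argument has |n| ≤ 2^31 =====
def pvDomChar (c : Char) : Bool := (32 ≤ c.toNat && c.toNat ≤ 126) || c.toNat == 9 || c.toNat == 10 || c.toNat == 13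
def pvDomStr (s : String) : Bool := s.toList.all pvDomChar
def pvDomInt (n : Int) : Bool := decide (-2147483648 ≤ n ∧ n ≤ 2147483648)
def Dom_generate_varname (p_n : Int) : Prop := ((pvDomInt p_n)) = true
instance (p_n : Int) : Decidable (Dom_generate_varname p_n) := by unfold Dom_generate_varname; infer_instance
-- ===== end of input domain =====

-- B replaces A's while-loop with string prepends by a recursion on the magnitude of p_n
-- that emits digits most-significant-first via the call stack (objective: alternative).

-- module-level constants shared by A and B (exactly as in the Python sources)
def gvAr1 : List Char := "qwertyuiopasdfghjklzxcvbnmQWERTYUIOPASDFGHJKLZXCVBNM".toList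
def gvAr2 : List Char := "qwertyuiopasdfghjklzxcvbnmQWERTYUIOPASDFGHJKLZXCVBNM1234567890".toList
def gvN1 : Int := gvAr1.length   -- generate_varname__n1 = len(generate_varname__ar1) = 52
def gvN2 : Int := gvAr2.length   -- generate_varname__n2 = len(generate_varname__ar2) = 62

theorem gvN2_eq : gvN2 = 62 := by decide
theorem gvN1_eq : gvN1 = 52 := by decide

-- ===== PORT A =====
-- the while-loop of A; the pyGetD default is never reached under Pre_
def gvLoopA (n : Int) (retval : String) : String :=
  if n ≥ gvN1 then
    gvLoopA (PySem.Int.floordiv n gvN2)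
      (String.ofList [PySem.List.pyGetD gvAr2 (PySem.Int.mod n gvN2) 'q'] ++ retval)
  else
    String.ofList [PySem.List.pyGetD gvAr1 n 'q'] ++ retval
termination_by n.toNat
decreasing_by
  rename_i h
  rw [gvN1_eq] at h
  rw [gvN2_eq, PySem.Int.floordiv_eq_ediv_of_pos (by omega : (0:Int) < 62)]
  omega

def generate_varname (p_n : Int) : String := gvLoopA p_n ""

-- ===== PORT B =====
def generate_varname_alt (p_n : Int) : String :=
  if p_n < gvN1 then
    String.ofList [PySem.List.pyGetD gvAr1 p_n 'q']
  else
    generate_varname_alt (PySem.Int.floordiv p_n gvN2) ++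
      String.ofList [PySem.List.pyGetD gvAr2 (PySem.Int.mod p_n gvN2) 'q']
termination_by p_n.toNat
decreasing_by
  rename_i h
  rw [gvN1_eq] at h
  rw [gvN2_eq, PySem.Int.floordiv_eq_ediv_of_pos (by omega : (0:Int) < 62)]
  omega

-- ===== PRECONDITION & SPEC =====
-- Pre_ excludes inputs more negative than the length of ar1, where Python A (and B alike) raises IndexError on ar1[p_n].
def Pre_generate_varname (p_n : Int) : Prop := -52 ≤ p_n
instance (p_n : Int) : Decidable (Pre_generate_varname p_n) := by unfold Pre_generate_varname; infer_instance
def pvWitness_generate_varname : Int := (7)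

def Spec_generate_varname (p_n : Int) (out : String) : Prop := out = generate_varname_alt p_n
instance (p_n : Int) (out : String) : Decidable (Spec_generate_varname p_n out) := by unfold Spec_generate_varname; infer_instance

-- ===== CLAIM (what is proved, stated in full; the proofs are below) =====
def Claim_equal_generate_varname : Prop := ∀ (p_n : Int), Dom_generate_varname p_n → Pre_generate_varname p_n → Spec_generate_varname p_n (generate_varname p_n)

-- ===== LEMMAS AND PROOFS =====

theorem gvLoopA_eq_alt_append (k : Nat) (n : Int) (hk : n.toNat ≤ k) (hn : -52 ≤ n) (acc : String) :
    gvLoopA n acc = generate_varname_alt n ++ acc := by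
  induction k generalizing n acc with
  | zero =>
    have hlt : n < gvN1 := by rw [gvN1_eq]; omega
    rw [gvLoopA, generate_varname_alt, if_neg (by omega), if_pos hlt]
  | succ k ih =>
    by_cases h : n ≥ gvN1
    · rw [gvLoopA, generate_varname_alt, if_pos h, if_neg (by omega)]
      rw [gvN1_eq] at h
      have hd : PySem.Int.floordiv n gvN2 = n / 62 := by
        rw [gvN2_eq]; exact PySem.Int.floordiv_eq_ediv_of_pos (by omega)
      rw [ih (PySem.Int.floordiv n gvN2) (by rw [hd]; omega) (by rw [hd]; omega)]
      rw [String.append_assoc]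
    · rw [gvLoopA, generate_varname_alt, if_neg h, if_pos (by omega)]

-- ===== VERDICT (by name: the statement is the Claim_ definition above) =====
theorem generate_varname_spec : Claim_equal_generate_varname := by
  intro p_n _ hpre
  unfold Spec_generate_varname generate_varname
  rw [gvLoopA_eq_alt_append p_n.toNat p_n le_rfl hpre ""]
  simp
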